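-- pv_equiv track=rewrite | github.com/Saptarshi07/social-rewarding | public-goods-game/pgg_fixation_probabilities.py | get_nr_RS_RA_AR
-- ===== SOURCE A (Python) =====
-- def get_nr_RS_RA_AR(player_set):
--     #returns the number of social rewarders, antisocial rewarders and unconditional rewarders from a list of players
--     #list of players is a list of integers between 0 and 15.
--     nr_RS = 0
--     nr_RA = 0
--     nr_AR = 0
--     for ppl in player_set:
--         if(ppl%4 == 1):
--             nr_RS+=1
--         elif(ppl%4 == 2):
--             nr_RA+=1
--         elif(ppl%4 == 3):
--             nr_AR+=1
--     return (nr_RS,nr_RA,nr_AR)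
-- ===== SOURCE B (Python) =====
-- def _first_at_least(rems, t):
--     # index of the first element >= t in a non-decreasing list (len if none)
--     i = 0
--     for r in rems:
--         if r >= t:
--             break
--         i += 1
--     return i
--
-- def get_nr_RS_RA_AR(player_set):
--     rems = sorted(p % 4 for p in player_set)
--     b1 = _first_at_least(rems, 1)
--     b2 = _first_at_least(rems, 2)
--     b3 = _first_at_least(rems, 3)
--     return (b2 - b1, b3 - b2, len(rems) - b3)
-- ===== Notes on version B (the rewrite author's own statement) =====
-- stated objective: alternative
-- what changed: Replaces per-element branch counting with sort-then-boundary-scan: sort the residues mod 4, locate the first index at or above each threshold 1/2/3, and return the class sizes as differences of those boundary indices.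
import Mathlib
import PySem

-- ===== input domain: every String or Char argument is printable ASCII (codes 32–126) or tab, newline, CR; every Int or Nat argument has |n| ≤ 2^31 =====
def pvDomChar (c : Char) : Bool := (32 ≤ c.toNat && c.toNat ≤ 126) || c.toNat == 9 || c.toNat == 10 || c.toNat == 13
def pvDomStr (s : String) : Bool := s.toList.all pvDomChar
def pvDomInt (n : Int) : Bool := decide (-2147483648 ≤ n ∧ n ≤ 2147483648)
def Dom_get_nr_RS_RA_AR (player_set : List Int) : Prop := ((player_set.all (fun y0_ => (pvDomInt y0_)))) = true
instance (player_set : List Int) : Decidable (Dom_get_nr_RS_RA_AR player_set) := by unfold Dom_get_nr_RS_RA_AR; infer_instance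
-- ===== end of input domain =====

-- B sorts the residues mod 4 and reads the three class sizes off as differences of boundary
-- indices (first index ≥ 1, ≥ 2, ≥ 3), instead of A's per-element branch counting. Alternative
-- algorithm, not claimed faster.

-- ===== PORT A =====
def get_nr_RS_RA_AR (player_set : List Int) : Int × Int × Int :=
  let st := player_set.foldl (fun (acc : Int × Int × Int) ppl =>
    let (nr_RS, nr_RA, nr_AR) := acc
    if PySem.Int.mod ppl 4 = 1 then (nr_RS + 1, nr_RA, nr_AR)
    else if PySem.Int.mod ppl 4 = 2 then (nr_RS, nr_RA + 1, nr_AR)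
    else if PySem.Int.mod ppl 4 = 3 then (nr_RS, nr_RA, nr_AR + 1)
    else (nr_RS, nr_RA, nr_AR)) (0, 0, 0)
  st

-- ===== PORT B =====
-- Python's 'i = 0; for r in rems: if r >= t: break; i += 1; return i' as structural recursion.
def firstAtLeast (rems : List Int) (t : Int) : Int :=
  match rems with
  | [] => 0
  | r :: rs => if r ≥ t then 0 else 1 + firstAtLeast rs t

def get_nr_RS_RA_AR_alt (player_set : List Int) : Int × Int × Int :=
  let rems := PySem.List.sorted (player_set.map (fun p => PySem.Int.mod p 4)) (fun x => x) false
  let b1 := firstAtLeast rems 1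
  let b2 := firstAtLeast rems 2
  let b3 := firstAtLeast rems 3
  (b2 - b1, b3 - b2, (rems.length : Int) - b3)

-- ===== PRECONDITION & SPEC =====
def Spec_get_nr_RS_RA_AR (player_set : List Int) (out : Int × Int × Int) : Prop := out = get_nr_RS_RA_AR_alt player_set
instance (player_set : List Int) (out : Int × Int × Int) : Decidable (Spec_get_nr_RS_RA_AR player_set out) := by unfold Spec_get_nr_RS_RA_AR; infer_instance

-- ===== CLAIM (what is proved, stated in full; the proofs are below) =====
def Claim_equal_get_nr_RS_RA_AR : Prop := ∀ (player_set : List Int), Dom_get_nr_RS_RA_AR player_set → Spec_get_nr_RS_RA_AR player_set (get_nr_RS_RA_AR player_set)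

-- ===== LEMMAS AND PROOFS =====

-- A's fold, started from any accumulator, adds the counts of each residue class.
theorem foldA_eq (l : List Int) (a b c : Int) :
    l.foldl (fun (acc : Int × Int × Int) ppl =>
      let (nr_RS, nr_RA, nr_AR) := acc
      if PySem.Int.mod ppl 4 = 1 then (nr_RS + 1, nr_RA, nr_AR)
      else if PySem.Int.mod ppl 4 = 2 then (nr_RS, nr_RA + 1, nr_AR)
      else if PySem.Int.mod ppl 4 = 3 then (nr_RS, nr_RA, nr_AR + 1)
      else (nr_RS, nr_RA, nr_AR)) (a, b, c)
    = (a + ((l.map (fun p => PySem.Int.mod p 4)).count 1 : Int),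
       b + ((l.map (fun p => PySem.Int.mod p 4)).count 2 : Int),
       c + ((l.map (fun p => PySem.Int.mod p 4)).count 3 : Int)) := by
  induction l generalizing a b c with
  | nil => simp
  | cons x xs ih =>
    simp only [List.foldl_cons, List.map_cons, List.count_cons, beq_iff_eq]
    by_cases h1 : PySem.Int.mod x 4 = 1
    · rw [if_pos h1, ih, if_pos h1, if_neg (by omega), if_neg (by omega),
        Prod.ext_iff, Prod.ext_iff]
      refine ⟨by push_cast; ring, by push_cast; ring, by push_cast; ring⟩
    · by_cases h2 : PySem.Int.mod x 4 = 2
      · rw [if_neg h1, if_pos h2, ih, if_neg (by omega), if_pos h2, if_neg (by omega),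
          Prod.ext_iff, Prod.ext_iff]
        refine ⟨by push_cast; ring, by push_cast; ring, by push_cast; ring⟩
      · by_cases h3 : PySem.Int.mod x 4 = 3
        · rw [if_neg h1, if_neg h2, if_pos h3, ih, if_neg (by omega), if_neg (by omega),
            if_pos h3, Prod.ext_iff, Prod.ext_iff]
          refine ⟨by push_cast; ring, by push_cast; ring, by push_cast; ring⟩
        · rw [if_neg h1, if_neg h2, if_neg h3, ih, if_neg (by omega), if_neg (by omega),
            if_neg (by omega)]
          simp

-- On a non-decreasing list, the boundary scan returns the number of elements < t.
theorem firstAtLeast_eq_countP (l : List Int) (t : Int) (h : l.Pairwise (· ≤ ·)) :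
    firstAtLeast l t = (l.countP (fun r => decide (r < t)) : Int) := by
  induction l with
  | nil => simp [firstAtLeast]
  | cons r rs ih =>
    rcases List.pairwise_cons.mp h with ⟨hr, hrs⟩
    by_cases hge : r ≥ t
    · have : rs.countP (fun r => decide (r < t)) = 0 := by
        rw [List.countP_eq_zero]
        intro y hy
        simp only [decide_eq_true_eq, not_lt]
        exact le_trans hge (hr y hy)
      simp [firstAtLeast, hge, List.countP_cons, this, not_lt.mpr hge]
    · have hlt : r < t := lt_of_not_ge hge
      simp [firstAtLeast, hge, List.countP_cons, ih hrs, hlt]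
      push_cast; ring

-- Splitting the count of elements < t+1 into elements < t and elements equal to t.
theorem countP_lt_succ (l : List Int) (t s : Int) (hs : s = t + 1) :
    l.countP (fun r => decide (r < s)) = l.countP (fun r => decide (r < t)) + l.count t := by
  subst hs
  induction l with
  | nil => simp
  | cons x xs ih =>
    simp only [List.countP_cons, List.count_cons, beq_iff_eq, ih]
    by_cases hx : x = t
    · simp [hx]; omega
    · by_cases hlt : x < t
      · simp [hx, hlt, show x < t + 1 by omega]; omega
      · simp [hx, hlt, show ¬ x < t + 1 by omega]

-- Every residue is < 4, so countP (· < 4) is the whole length.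
theorem countP_lt_four (l : List Int) :
    (l.map (fun p => PySem.Int.mod p 4)).countP (fun r => decide (r < 4))
      = (l.map (fun p => PySem.Int.mod p 4)).length := by
  rw [List.countP_eq_length]
  intro r hr
  rcases List.mem_map.mp hr with ⟨p, _, rfl⟩
  simpa using PySem.Int.mod_lt p (b := 4) (by norm_num)

-- ===== VERDICT (by name: the statement is the Claim_ definition above) =====
theorem get_nr_RS_RA_AR_spec : Claim_equal_get_nr_RS_RA_AR := by
  intro l _
  unfold Spec_get_nr_RS_RA_AR get_nr_RS_RA_AR get_nr_RS_RA_AR_alt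
  simp only [foldA_eq, zero_add]
  set rems0 := l.map (fun p => PySem.Int.mod p 4) with hrems0
  set rems := PySem.List.sorted rems0 (fun x => x) false with hrems
  have hperm : rems.Perm rems0 := PySem.List.sorted_perm ..
  have hpw : rems.Pairwise (· ≤ ·) := by
    simpa using PySem.List.sorted_pairwise (xs := rems0) (key := fun x => x)
  have hb : ∀ t : Int, firstAtLeast rems t = (rems0.countP (fun r => decide (r < t)) : Int) := by
    intro t
    rw [firstAtLeast_eq_countP rems t hpw, hperm.countP_eq]
  have hlen : (rems.length : Int) = (rems0.countP (fun r => decide (r < 4)) : Int) := by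
    rw [hperm.length_eq, countP_lt_four]
  have hc1 := countP_lt_succ rems0 1 2 (by norm_num)
  have hc2 := countP_lt_succ rems0 2 3 (by norm_num)
  have hc3 := countP_lt_succ rems0 3 4 (by norm_num)
  refine Prod.ext ?_ (Prod.ext ?_ ?_)
  · show ((rems0.count 1 : Int)) = firstAtLeast rems 2 - firstAtLeast rems 1
    rw [hb, hb]; omega
  · show ((rems0.count 2 : Int)) = firstAtLeast rems 3 - firstAtLeast rems 2
    rw [hb, hb]; omega
  · show ((rems0.count 3 : Int)) = (rems.length : Int) - firstAtLeast rems 3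
    rw [hb, hlen]; omega
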